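-- pv_equiv track=rewrite | github.com/alanbracco/twnorm | eval2.py | get_true_positives
-- ===== SOURCE A (Python) =====
-- from collections import Counter
--
-- def get_true_positives(gold_dict, gen_dict, for_correction=False):
--
--     hits = 0
--     tweet_ids = sorted(list(set(gold_dict.keys()) & set(gen_dict.keys())))
--
--     for tweet_id in tweet_ids:
--         current_hits = 0
--
--         gold = gold_dict[tweet_id]
--         generated = gen_dict[tweet_id]
--         if not for_correction:
--             gold = [w for w, _, _ in gold]
--             generated = [w for w, _, _ in generated]
--
--         current_hits += len(set(gold) & set(generated))
--
--         gold_counter = Counter(gold)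
--         gen_counter = Counter(generated)
--         for key, times in gold_counter.items():
--             if key in generated and times > 1:
--                 # Minus 1 because the first count appears in
--                 # conjunction of gold and generated sets
--                 current_hits += times - 1
--         hits += current_hits
--
--     return hits
-- ===== SOURCE B (Python) =====
-- def get_true_positives(gold_dict, gen_dict, for_correction=False):
--     # A's per-tweet "distinct-intersection size + Counter extras" equals the
--     # number of gold tokens whose value occurs among the generated ones; count
--     # that directly via a prebuilt id -> generated-set index.
--     def run(gd, nd):
--         gen_sets = {tid: set(items) for tid, items in nd.items()}
--         total = 0
--         for tid, items in gd.items():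
--             s = gen_sets.get(tid)
--             if s is None:
--                 continue
--             for w in items:
--                 if w in s:
--                     total += 1
--         return total
--
--     if for_correction:
--         return run(gold_dict, gen_dict)
--     return run({k: [w for w, _, _ in v] for k, v in gold_dict.items()},
--                {k: [w for w, _, _ in v] for k, v in gen_dict.items()})
-- ===== Notes on version B (the rewrite author's own statement) =====
-- stated objective: simpler
-- what changed: A sorts the shared-id intersection and, per tweet, adds the distinct-word intersection size plus a Counter pass adding (count-1) for repeated gold words; B instead maps the word extraction over both dicts once up front, builds an id -> generated-set index, and counts gold tokens found in the set for their id, skipping ids absent from the index (no sort, no Counter).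
import Mathlib
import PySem

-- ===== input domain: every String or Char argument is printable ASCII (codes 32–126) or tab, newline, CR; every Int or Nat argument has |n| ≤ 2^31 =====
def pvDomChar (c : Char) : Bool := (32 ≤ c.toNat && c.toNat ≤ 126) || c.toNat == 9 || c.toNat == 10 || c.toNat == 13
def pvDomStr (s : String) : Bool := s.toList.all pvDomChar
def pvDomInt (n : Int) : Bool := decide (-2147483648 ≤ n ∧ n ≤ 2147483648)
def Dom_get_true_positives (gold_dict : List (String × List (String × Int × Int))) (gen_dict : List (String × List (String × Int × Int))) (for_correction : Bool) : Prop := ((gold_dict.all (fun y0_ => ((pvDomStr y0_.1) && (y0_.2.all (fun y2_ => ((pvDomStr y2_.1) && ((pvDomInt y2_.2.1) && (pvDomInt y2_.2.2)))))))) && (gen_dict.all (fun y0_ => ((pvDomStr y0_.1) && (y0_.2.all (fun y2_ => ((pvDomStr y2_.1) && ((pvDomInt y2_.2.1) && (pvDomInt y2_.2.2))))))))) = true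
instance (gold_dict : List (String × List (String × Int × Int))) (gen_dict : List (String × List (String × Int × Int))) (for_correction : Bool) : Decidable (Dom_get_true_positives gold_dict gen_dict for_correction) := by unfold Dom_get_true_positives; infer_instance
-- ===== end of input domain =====

-- B drops A's sorted-intersection loop and per-tweet Counter pass: it maps the word
-- extraction over both dicts once, indexes the generated side as id -> set, and counts
-- gold tokens found in that set (objective: simpler).

-- ===== PORT A =====
-- per-tweet body of A (generic: elements are words, or whole (w,i,j) tuples when for_correction)
def pvA_currentHits {α : Type} [DecidableEq α] (gold generated : List α) : Int :=
  let base : Int := (PySem.Set.inter (PySem.Set.ofList gold) (PySem.Set.ofList generated)).length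
  let gold_counter := PySem.Dict.counter gold
  let _gen_counter := PySem.Dict.counter generated
  gold_counter.items.foldl
    (fun current_hits kt =>
      if kt.1 ∈ generated ∧ kt.2 > 1 then current_hits + (kt.2 - 1) else current_hits)
    base

def get_true_positives (gold_dict : List (String × List (String × Int × Int))) (gen_dict : List (String × List (String × Int × Int))) (for_correction : Bool) : Int :=
  let gd := PySem.Dict.ofList gold_dict
  let nd := PySem.Dict.ofList gen_dict
  let tweet_ids := PySem.List.sorted (PySem.Set.inter (PySem.Set.ofList gd.keys) (PySem.Set.ofList nd.keys)) (fun x => x) false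
  tweet_ids.foldl
    (fun hits tweet_id =>
      let gold := gd.getD tweet_id []
      let generated := nd.getD tweet_id []
      hits + (if !for_correction then
                pvA_currentHits (gold.map (·.1)) (generated.map (·.1))
              else
                pvA_currentHits gold generated))
    0

-- ===== PORT B =====
-- 'for w in items: if w in s: total += 1', as structural recursion
def pvB_countIn {α : Type} [DecidableEq α] (s : PySem.Set α) : List α → Int
  | [] => 0
  | w :: ws => (if PySem.Set.contains s w then 1 else 0) + pvB_countIn s ws

-- the 'for tid, items in gd.items()' loop with the gen_sets.get(tid) lookup
def pvB_loop {α : Type} [DecidableEq α] (gen_sets : PySem.Dict String (PySem.Set α)) : List (String × List α) → Int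
  | [] => 0
  | (tid, items) :: rest =>
      (match gen_sets.get? tid with
       | none => 0
       | some s => pvB_countIn s items) + pvB_loop gen_sets rest

-- def run(gd, nd): build gen_sets = {tid: set(items)}, then sum membership hits
def pvB_run {α : Type} [DecidableEq α] (gd nd : PySem.Dict String (List α)) : Int :=
  let gen_sets := PySem.Dict.ofList (nd.items.map (fun kv => (kv.1, PySem.Set.ofList kv.2)))
  pvB_loop gen_sets gd.items

def get_true_positives_alt (gold_dict : List (String × List (String × Int × Int))) (gen_dict : List (String × List (String × Int × Int))) (for_correction : Bool) : Int :=
  if for_correction then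
    pvB_run (PySem.Dict.ofList gold_dict) (PySem.Dict.ofList gen_dict)
  else
    pvB_run
      (PySem.Dict.ofList ((PySem.Dict.ofList gold_dict).items.map (fun kv => (kv.1, kv.2.map (·.1)))))
      (PySem.Dict.ofList ((PySem.Dict.ofList gen_dict).items.map (fun kv => (kv.1, kv.2.map (·.1)))))

-- ===== PRECONDITION & SPEC =====
def Spec_get_true_positives (gold_dict : List (String × List (String × Int × Int))) (gen_dict : List (String × List (String × Int × Int))) (for_correction : Bool) (out : Int) : Prop := out = get_true_positives_alt gold_dict gen_dict for_correction
instance (gold_dict : List (String × List (String × Int × Int))) (gen_dict : List (String × List (String × Int × Int))) (for_correction : Bool) (out : Int) : Decidable (Spec_get_true_positives gold_dict gen_dict for_correction out) := by unfold Spec_get_true_positives; infer_instance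

-- ===== CLAIM (what is proved, stated in full; the proofs are below) =====
def Claim_equal_get_true_positives : Prop := ∀ (gold_dict : List (String × List (String × Int × Int))) (gen_dict : List (String × List (String × Int × Int))) (for_correction : Bool), Dom_get_true_positives gold_dict gen_dict for_correction → Spec_get_true_positives gold_dict gen_dict for_correction (get_true_positives gold_dict gen_dict for_correction)

-- ===== LEMMAS AND PROOFS =====

-- sum over a Nodup list of a "single spike at x" map
lemma pvSum_spike {α : Type} [DecidableEq α] (D : List α) (hD : D.Nodup) (x : α) (hx : x ∈ D) (v : Int) :
    (D.map (fun k => if k = x then v else 0)).sum = v := by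
  induction D with
  | nil => cases hx
  | cons d rest ih =>
      by_cases h : x = d
      · subst h
        have hz : ∀ k ∈ rest, (if k = x then v else (0:Int)) = 0 := by
          intro k hk
          have hne : k ≠ x := fun he => (List.nodup_cons.mp hD).1 (he ▸ hk)
          simp [hne]
        simp [List.map_congr_left hz]
      · have hmem : x ∈ rest := by
          rcases List.mem_cons.mp hx with h' | h'
          · exact absurd h' h
          · exact h'
        have hd : d ≠ x := fun he => h he.symm
        simp [hd, ih (List.nodup_cons.mp hD).2 hmem]

-- summing gold-multiplicities of the p-satisfying distinct words counts the p-satisfying tokens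
lemma pvSum_count {α : Type} [DecidableEq α] (p : α → Prop) [DecidablePred p]
    (D : List α) (hD : D.Nodup) :
    ∀ gold : List α, (∀ y ∈ gold, y ∈ D) →
      (D.map (fun k => if p k then (gold.count k : Int) else 0)).sum
        = (gold.countP (fun y => decide (p y)) : Int) := by
  intro gold
  induction gold with
  | nil => intro _; simp
  | cons x xs ih =>
      intro hsub
      have hx : x ∈ D := hsub x (List.mem_cons_self ..)
      have hsub' : ∀ y ∈ xs, y ∈ D := fun y hy => hsub y (List.mem_cons_of_mem _ hy)
      have step : ∀ k, (if p k then ((x :: xs).count k : Int) else 0)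
          = (if p k then (xs.count k : Int) else 0) + (if k = x then (if p x then 1 else 0) else 0) := by
        intro k
        by_cases hk : k = x
        · subst hk; by_cases hp : p k <;> simp [hp, List.count_cons_self]
        · have hxk : ¬ x = k := fun he => hk he.symm
          have hc : (x :: xs).count k = xs.count k := by
            simp [hxk]
          by_cases hp : p k <;> simp [hp, hc, hk]
      calc (D.map (fun k => if p k then ((x :: xs).count k : Int) else 0)).sum
          = (D.map (fun k => (if p k then (xs.count k : Int) else 0)
              + (if k = x then (if p x then 1 else 0) else 0))).sum := by
            exact congrArg List.sum (List.map_congr_left (fun k _ => step k))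
        _ = (D.map (fun k => if p k then (xs.count k : Int) else 0)).sum
              + (D.map (fun k => if k = x then (if p x then 1 else 0) else 0)).sum := by
            simp [List.sum_map_add]
        _ = (xs.countP (fun y => decide (p y)) : Int) + (if p x then 1 else 0) := by
            rw [ih hsub', pvSum_spike D hD x hx]
        _ = ((x :: xs).countP (fun y => decide (p y)) : Int) := by
            by_cases hp : p x <;> simp [hp]

-- A's per-tweet body counts the gold tokens whose value occurs among the generated ones
lemma pvA_eq_countP {α : Type} [DecidableEq α] (gold generated : List α) :
    pvA_currentHits gold generated = (gold.countP (fun y => decide (y ∈ generated)) : Int) := by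
  unfold pvA_currentHits
  simp only []
  rw [PySem.Dict.items_counter, List.foldl_map]
  dsimp only
  rw [PySem.List.foldl_congr_mem _ _
    (fun acc k => acc +
      (if k ∈ generated ∧ (gold.count k : Int) > 1 then (gold.count k : Int) - 1 else 0)) _
    (by intro acc k _
        simp only []
        split_ifs <;> ring)]
  rw [PySem.List.foldl_add]
  have hbase : ((PySem.Set.inter (PySem.Set.ofList gold) (PySem.Set.ofList generated)).length : Int)
      = (((PySem.Set.ofList gold).map
          (fun k => if k ∈ generated then (1:Int) else 0)).sum) := by
    have : PySem.Set.inter (PySem.Set.ofList gold) (PySem.Set.ofList generated)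
        = (PySem.Set.ofList gold).filter (fun k => decide (k ∈ generated)) := by
      show (PySem.Set.ofList gold).filter _ = _
      apply List.filter_congr
      intro k _
      by_cases h : k ∈ generated <;>
        simp [h, PySem.Set.mem_ofList]
    rw [this, ← List.countP_eq_length_filter]
    induction (PySem.Set.ofList gold) with
    | nil => simp
    | cons d rest ih =>
        by_cases h : d ∈ generated <;> simp [h, ih] <;> ring
  rw [hbase, ← List.sum_map_add]
  have hpoint : ∀ k ∈ PySem.Set.ofList gold,
      ((if k ∈ generated then (1:Int) else 0) +
        (if k ∈ generated ∧ (gold.count k : Int) > 1 then (gold.count k : Int) - 1 else 0))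
      = (if k ∈ generated then (gold.count k : Int) else 0) := by
    intro k hk
    have hkg : k ∈ gold := (PySem.Set.mem_ofList gold k).mp hk
    have hcnt : 1 ≤ gold.count k := List.count_pos_iff.mpr hkg
    by_cases h : k ∈ generated
    · by_cases h2 : (gold.count k : Int) > 1
      · simp [h, h2]
      · have : gold.count k = 1 := by omega
        simp [h, this]
    · simp [h]
  rw [List.map_congr_left hpoint]
  rw [pvSum_count (fun k => k ∈ generated) (PySem.Set.ofList gold)
    (PySem.Set.nodup_ofList gold) gold
    (fun y hy => (PySem.Set.mem_ofList gold y).mpr hy)]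

-- B's inner count equals the same token count
lemma pvB_countIn_eq {α : Type} [DecidableEq α] (generated gold : List α) :
    pvB_countIn (PySem.Set.ofList generated) gold
      = (gold.countP (fun y => decide (y ∈ generated)) : Int) := by
  induction gold with
  | nil => simp [pvB_countIn]
  | cons w ws ih =>
      by_cases h : w ∈ generated
      · simp [pvB_countIn, ih, h]
        ring
      · simp [pvB_countIn, ih, h]

-- B's outer loop is a sum over the items
lemma pvB_loop_eq_sum {α : Type} [DecidableEq α] (gs : PySem.Dict String (PySem.Set α)) (l : List (String × List α)) :
    pvB_loop gs l
      = (l.map (fun kv => match gs.get? kv.1 with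
                          | none => 0
                          | some s => pvB_countIn s kv.2)).sum := by
  induction l with
  | nil => simp [pvB_loop]
  | cons kv rest ih => cases kv; simp [pvB_loop, ih]

-- ofList on a nodup-keyed pair list is the identity on items
lemma pvOfList_items {κ ν : Type} [DecidableEq κ] (l : List (κ × ν)) (h : (l.map Prod.fst).Nodup) :
    (PySem.Dict.ofList l).items = l := by
  have := PySem.Dict.items_foldl_insert_fresh (l := l) (k := Prod.fst) (v := Prod.snd)
    (d := PySem.Dict.empty) (by simp) h
  simpa using this

-- lookup in the value-mapped rebuild of a nodup-keyed dict
lemma pvGet_mapped {κ ν β : Type} [DecidableEq κ] (d : PySem.Dict κ ν) (f : ν → β)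
    (hd : d.keys.Nodup) (t : κ) :
    (PySem.Dict.ofList (d.items.map (fun kv => (kv.1, f kv.2)))).get? t = (d.get? t).map f := by
  have hk : ((d.items.map (fun kv => (kv.1, f kv.2))).map Prod.fst).Nodup := by
    simpa [List.map_map, Function.comp] using hd
  have hitems := pvOfList_items _ hk
  cases hv : d.get? t with
  | some v =>
      have hmem : (t, v) ∈ d.items := PySem.Dict.mem_items_of_get?_eq_some _ hv
      have hmem' : (t, f v) ∈ (PySem.Dict.ofList (d.items.map (fun kv => (kv.1, f kv.2)))).items := by
        rw [hitems]
        exact List.mem_map.mpr ⟨(t, v), hmem, rfl⟩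
      have hk' : (PySem.Dict.ofList (d.items.map (fun kv => (kv.1, f kv.2)))).keys.Nodup := by
        simpa [PySem.Dict.keys, hitems] using hk
      simpa using PySem.Dict.get?_of_mem_items _ hmem' hk'
  | none =>
      have hnt : t ∉ d.keys := (PySem.Dict.get?_eq_none_iff_not_mem_keys _ _).mp hv
      have : t ∉ (PySem.Dict.ofList (d.items.map (fun kv => (kv.1, f kv.2)))).keys := by
        simpa [PySem.Dict.keys, hitems, List.map_map, Function.comp] using hnt
      simpa using (PySem.Dict.get?_eq_none_iff_not_mem_keys _ _).mpr this

-- A's sorted-intersection fold, as a sum over the gold keys with a membership guard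
lemma pvTopSum (keysG keysN : List String) (h : String → Int) (hnodup : keysG.Nodup) :
    (PySem.List.sorted
        (PySem.Set.inter (PySem.Set.ofList keysG) (PySem.Set.ofList keysN))
        (fun x => x) false).foldl (fun hits tid => hits + h tid) 0
      = (keysG.map (fun tid => if tid ∈ keysN then h tid else 0)).sum := by
  rw [PySem.List.foldl_add]
  have hinter : PySem.Set.inter (PySem.Set.ofList keysG) (PySem.Set.ofList keysN)
      = keysG.filter (fun x => decide (x ∈ keysN)) := by
    rw [PySem.Set.ofList_eq_self_of_nodup keysG hnodup]
    show keysG.filter _ = _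
    apply List.filter_congr
    intro k _
    by_cases hk : k ∈ keysN <;> simp [hk, PySem.Set.mem_ofList]
  rw [((PySem.List.sorted_perm _ _ _).map h).sum_eq, hinter]
  have hsum : ∀ K : List String,
      ((K.filter (fun x => decide (x ∈ keysN))).map h).sum
        = (K.map (fun tid => if tid ∈ keysN then h tid else 0)).sum := by
    intro K
    induction K with
    | nil => simp
    | cons k rest ih => by_cases hk : k ∈ keysN <;> simp [hk, ih]
  rw [hsum]
  ring

-- the per-tweet values B sums agree with the guarded A values, for any nodup dicts
lemma pvRun_eq {α : Type} [DecidableEq α] (gd nd : PySem.Dict String (List α))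
    (hg : gd.keys.Nodup) (hn : nd.keys.Nodup) :
    (PySem.List.sorted (PySem.Set.inter (PySem.Set.ofList gd.keys) (PySem.Set.ofList nd.keys)) (fun x => x) false).foldl
      (fun hits tid => hits + pvA_currentHits (gd.getD tid []) (nd.getD tid [])) 0
    = pvB_run gd nd := by
  rw [pvTopSum _ _ _ hg]
  unfold pvB_run
  rw [pvB_loop_eq_sum]
  have hself : nd.items.map (fun kv => (kv.1, PySem.Set.ofList kv.2))
      = nd.items.map (fun kv => (kv.1, (fun v => PySem.Set.ofList v) kv.2)) := rfl
  rw [PySem.Dict.items_eq_map_keys gd hg [], List.map_map]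
  apply congrArg List.sum
  apply List.map_congr_left
  intro t _
  have hget := pvGet_mapped nd (fun v => PySem.Set.ofList v) hn t
  rw [hself] at *
  cases hv : nd.get? t with
  | none =>
      have hnt : t ∉ nd.keys := (PySem.Dict.get?_eq_none_iff_not_mem_keys _ _).mp hv
      simp only [Function.comp]
      rw [hget, hv]
      simp [hnt]
  | some v =>
      have hmem : t ∈ nd.keys := by
        by_contra hcon
        rw [(PySem.Dict.get?_eq_none_iff_not_mem_keys _ _).mpr hcon] at hv
        cases hv
      have hgd : nd.getD t [] = v := PySem.Dict.getD_of_get?_eq_some _ _ hv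
      simp only [Function.comp]
      rw [hget, hv]
      simp only [Option.map_some, hmem, if_pos]
      rw [pvA_eq_countP, hgd, pvB_countIn_eq]

-- values of the mapped rebuild, at keys of the original
lemma pvGetD_mapped {κ ν β : Type} [DecidableEq κ] (d : PySem.Dict κ ν) (f : ν → β)
    (hd : d.keys.Nodup) (t : κ) (ht : t ∈ d.keys) (x : ν) (y : β) :
    (PySem.Dict.ofList (d.items.map (fun kv => (kv.1, f kv.2)))).getD t y = f (d.getD t x) := by
  cases hv : d.get? t with
  | none => exact absurd ((PySem.Dict.get?_eq_none_iff_not_mem_keys _ _).mp hv) (by simpa using ht)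
  | some v =>
      rw [PySem.Dict.getD_of_get?_eq_some _ y (by rw [pvGet_mapped d f hd t, hv]; rfl),
        PySem.Dict.getD_of_get?_eq_some _ _ hv]

-- keys of the mapped rebuild
lemma pvKeys_mapped {κ ν β : Type} [DecidableEq κ] (d : PySem.Dict κ ν) (f : ν → β)
    (hd : d.keys.Nodup) :
    (PySem.Dict.ofList (d.items.map (fun kv => (kv.1, f kv.2)))).keys = d.keys := by
  have hk : ((d.items.map (fun kv => (kv.1, f kv.2))).map Prod.fst).Nodup := by
    simpa [List.map_map, Function.comp] using hd
  simp [PySem.Dict.keys, pvOfList_items _ hk, List.map_map, Function.comp]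

-- ===== VERDICT (by name: the statement is the Claim_ definition above) =====
theorem get_true_positives_spec : Claim_equal_get_true_positives := by
  intro gold_dict gen_dict fc _
  unfold Spec_get_true_positives get_true_positives get_true_positives_alt
  simp only []
  set gd := PySem.Dict.ofList gold_dict with hgd
  set nd := PySem.Dict.ofList gen_dict with hnd
  have hg : gd.keys.Nodup := PySem.Dict.nodup_keys_ofList gold_dict
  have hn : nd.keys.Nodup := PySem.Dict.nodup_keys_ofList gen_dict
  cases fc with
  | true =>
      simp only [Bool.not_true, Bool.false_eq_true, if_false, reduceIte]
      exact pvRun_eq gd nd hg hn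
  | false =>
      simp only [Bool.not_false, reduceIte]
      set gd' := PySem.Dict.ofList (gd.items.map (fun kv => (kv.1, kv.2.map (·.1)))) with hgd'
      set nd' := PySem.Dict.ofList (nd.items.map (fun kv => (kv.1, kv.2.map (·.1)))) with hnd'
      have hg' : gd'.keys = gd.keys := pvKeys_mapped gd _ hg
      have hn' : nd'.keys = nd.keys := pvKeys_mapped nd _ hn
      have := pvRun_eq gd' nd' (hg' ▸ hg) (hn' ▸ hn)
      rw [hg', hn'] at this
      rw [← this]
      apply PySem.List.foldl_congr_mem
      intro acc t ht
      have htg : t ∈ gd.keys ∧ t ∈ nd.keys := by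
        have hmem := ((PySem.List.sorted_perm _ _ _).mem_iff).mp ht
        have h1 : t ∈ PySem.Set.ofList gd.keys := List.mem_of_mem_filter hmem
        have h2 := List.of_mem_filter hmem
        constructor
        · exact (PySem.Set.mem_ofList _ _).mp h1
        · exact (PySem.Set.mem_ofList _ _).mp (by simpa using h2)
      rw [pvGetD_mapped gd _ hg t htg.1 [] [], pvGetD_mapped nd _ hn t htg.2 [] []]
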